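-- pv_equiv track=rewrite | github.com/edcedcedcedc/computer-science-curriculum-ossu | random/self-defined-problems.py | problem4a
-- ===== SOURCE A (Python) =====
-- def problem4a(s):
--     result = []
--     stack = [("", s)]
--     while stack:
--         perm, remaining = stack.pop()
--         if len(remaining) == 0:
--             result += perm
--         else:
--             for i in range(len(remaining)):
--                 stack.append((perm + remaining[i], remaining[:i] + remaining[i+1:]))
--     return result
-- ===== SOURCE B (Python) =====
-- def problem4a(s):
--     # Recursive: build all permutations in forward index order, then emit
--     # their characters from the reversed permutation list.
--     def picks(r):
--         if not r:
--             return []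
--         c, cs = r[0], r[1:]
--         return [(c, cs)] + [(x, c + rest) for (x, rest) in picks(cs)]
--
--     def perms(r):
--         if not r:
--             return [""]
--         return [c + p for (c, rest) in picks(r) for p in perms(rest)]
--
--     return [ch for p in reversed(perms(s)) for ch in p]
-- ===== Notes on version B (the rewrite author's own statement) =====
-- stated objective: alternative
-- what changed: Replaces A's explicit LIFO stack loop with a structural recursion (picks/perms) that builds the full permutation list forward, then reverses it and flattens its characters; A's interleaved stack state disappears.
import Mathlib
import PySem

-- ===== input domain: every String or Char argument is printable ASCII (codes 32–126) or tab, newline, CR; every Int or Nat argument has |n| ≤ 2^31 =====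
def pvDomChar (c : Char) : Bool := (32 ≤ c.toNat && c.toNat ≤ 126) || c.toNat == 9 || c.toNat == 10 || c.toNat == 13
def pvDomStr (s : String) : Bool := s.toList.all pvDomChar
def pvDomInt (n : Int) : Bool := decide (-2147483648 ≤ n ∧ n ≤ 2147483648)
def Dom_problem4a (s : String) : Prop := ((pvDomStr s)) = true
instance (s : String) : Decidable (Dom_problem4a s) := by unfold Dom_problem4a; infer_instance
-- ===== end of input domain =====

-- B replaces A's explicit LIFO stack by a structural recursion that builds the
-- permutation list forward and then emits the characters of its reversal
-- (objective: alternative decomposition, same exponential cost).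

-- ===== PORT A =====
-- Explicit stack loop, transliterating the Python while-loop; the stack top is
-- the list head, so pushing children i = 0..n-1 prepends them reversed.
-- remaining[:i], remaining[i+1:], remaining[i] are exact as take/drop/getD here
-- because 0 ≤ i < remaining.length.

def pvWeightA (st : List (List Char × List Char)) : Nat :=
  (st.map (fun pr => Nat.factorial (pr.2.length + 1))).sum

lemma pvWeightA_children (perm remaining : List Char) (h : remaining.length ≠ 0) :
    pvWeightA ((((List.range remaining.length).map
        (fun i => (perm ++ [remaining.getD i ' '], remaining.take i ++ remaining.drop (i+1)))).reverse)) <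
      Nat.factorial (remaining.length + 1) := by
  have hmap : ∀ i ∈ List.range remaining.length,
      Nat.factorial ((remaining.take i ++ remaining.drop (i+1)).length + 1)
        = Nat.factorial remaining.length := by
    intro i hi
    have hi' : i < remaining.length := List.mem_range.mp hi
    have : (remaining.take i ++ remaining.drop (i+1)).length = remaining.length - 1 := by
      simp [List.length_take, List.length_drop]
      omega
    rw [this]
    congr 1
    omega
  unfold pvWeightA
  rw [List.map_reverse, List.sum_reverse, List.map_map]
  have hcomp : ∀ i ∈ List.range remaining.length,
      ((fun pr : List Char × List Char => Nat.factorial (pr.2.length + 1)) ∘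
        (fun i => (perm ++ [remaining.getD i ' '], remaining.take i ++ remaining.drop (i+1)))) i
        = Nat.factorial remaining.length := by
    intro i hi; simpa using hmap i hi
  rw [List.map_congr_left hcomp]
  have hrep : ((List.range remaining.length).map
      (fun _ => Nat.factorial remaining.length)).sum
      = remaining.length * Nat.factorial remaining.length := by
    simp [List.map_const', List.sum_replicate, smul_eq_mul]
  rw [hrep, Nat.factorial_succ]
  have := Nat.factorial_pos remaining.length
  have hlen : 1 ≤ remaining.length := Nat.one_le_iff_ne_zero.mpr h
  nlinarith

def problem4aLoop (stack : List (List Char × List Char)) (result : List String) : List String :=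
  match stack with
  | [] => result
  | (perm, remaining) :: rest =>
    if remaining.length = 0 then
      problem4aLoop rest (result ++ perm.map (fun c => String.ofList [c]))
    else
      problem4aLoop
        ((((List.range remaining.length).map
            (fun i => (perm ++ [remaining.getD i ' '], remaining.take i ++ remaining.drop (i+1)))).reverse) ++ rest)
        result
termination_by pvWeightA stack
decreasing_by
  · have := Nat.factorial_pos (remaining.length + 1)
    simp [pvWeightA]
    omega
  · rename_i h
    have hc := pvWeightA_children perm remaining h
    simp only [pvWeightA, List.map_append, List.sum_append, List.map_cons, List.sum_cons] at *
    omega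

def problem4a (s : String) : List String := problem4aLoop [([], s.toList)] []

-- ===== PORT B =====
-- picks r = [(r[i], r without r[i]) for i in order]; perms builds all
-- permutations forward; the result flattens the reversed permutation list.

def problem4aPicks : List Char → List (Char × List Char)
  | [] => []
  | c :: cs => (c, cs) :: (problem4aPicks cs).map (fun p => (p.1, c :: p.2))

lemma problem4aPicks_len : ∀ (r : List Char) (x : Char × List Char),
    x ∈ problem4aPicks r → x.2.length + 1 = r.length := by
  intro r
  induction r with
  | nil => intro x hx; simp [problem4aPicks] at hx
  | cons c cs ih =>
    intro x hx
    simp only [problem4aPicks, List.mem_cons, List.mem_map] at hx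
    rcases hx with h | ⟨y, hy, rfl⟩
    · subst h; simp
    · have := ih y hy; simp; omega

def problem4aPerms : List Char → List (List Char)
  | [] => [[]]
  | c :: cs =>
    (problem4aPicks (c :: cs)).attach.flatMap
      (fun x => (problem4aPerms x.1.2).map (x.1.1 :: ·))
termination_by r => r.length
decreasing_by
  have := problem4aPicks_len (c :: cs) x.1 x.2
  simp at this ⊢
  omega

def problem4a_alt (s : String) : List String :=
  ((problem4aPerms s.toList).reverse).flatMap (fun p => p.map (fun c => String.ofList [c]))

-- ===== PRECONDITION & SPEC =====
def Spec_problem4a (s : String) (out : List String) : Prop := out = problem4a_alt s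
instance (s : String) (out : List String) : Decidable (Spec_problem4a s out) := by unfold Spec_problem4a; infer_instance

-- ===== CLAIM (what is proved, stated in full; the proofs are below) =====
def Claim_equal_problem4a : Prop := ∀ (s : String), Dom_problem4a s → Spec_problem4a s (problem4a s)

-- ===== LEMMAS AND PROOFS =====

-- contribution of one stack node (p, r) to A's final result
def pvPayload (p r : List Char) : List String :=
  (problem4aPerms r).reverse.flatMap (fun q => (p ++ q).map (fun c => String.ofList [c]))

lemma picks_eq (r : List Char) :
    problem4aPicks r
      = (List.range r.length).map (fun i => (r.getD i ' ', r.take i ++ r.drop (i+1))) := by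
  induction r with
  | nil => simp [problem4aPicks]
  | cons c cs ih =>
    simp [problem4aPicks, ih, List.range_succ_eq_map, List.map_map, Function.comp]

lemma perms_cons (c : Char) (cs : List Char) :
    problem4aPerms (c :: cs)
      = (problem4aPicks (c :: cs)).flatMap (fun x => (problem4aPerms x.2).map (x.1 :: ·)) := by
  rw [problem4aPerms]
  simp [List.flatMap, List.attach, List.attachWith, List.map_pmap, List.pmap_eq_map]

lemma payload_step (p : List Char) (c : Char) (cs : List Char) :
    pvPayload p (c :: cs)
      = ((((List.range (c :: cs).length).map
            (fun i => (p ++ [(c :: cs).getD i ' '],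
                       (c :: cs).take i ++ (c :: cs).drop (i+1)))).reverse)).flatMap
          (fun pr => pvPayload pr.1 pr.2) := by
  have hchild : (List.range (c :: cs).length).map
      (fun i => (p ++ [(c :: cs).getD i ' '], (c :: cs).take i ++ (c :: cs).drop (i+1)))
      = (problem4aPicks (c :: cs)).map (fun x => (p ++ [x.1], x.2)) := by
    rw [picks_eq]; simp [List.map_map, Function.comp]
  rw [hchild]
  unfold pvPayload
  rw [perms_cons]
  rw [List.reverse_flatMap, List.flatMap_assoc, ← List.map_reverse, List.flatMap_map]
  apply List.flatMap_congr
  intro x hx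
  simp only [Function.comp, ← List.map_reverse, List.flatMap_map]
  apply List.flatMap_congr
  intro q hq
  simp

lemma loop_eq (stack : List (List Char × List Char)) (result : List String) :
    problem4aLoop stack result
      = result ++ stack.flatMap (fun pr => pvPayload pr.1 pr.2) := by
  induction stack, result using problem4aLoop.induct with
  | case1 result => simp [problem4aLoop]
  | case2 result perm remaining rest h ih =>
    have hr : remaining = [] := List.length_eq_zero_iff.mp h
    subst hr
    rw [problem4aLoop]
    simp only [List.length_nil, if_true]
    simp only [List.attach, List.attachWith, List.map_pmap, List.pmap_eq_map] at ih
    rw [ih]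
    simp [pvPayload, problem4aPerms]
  | case3 result perm remaining rest h ih =>
    rw [problem4aLoop]
    rw [if_neg h]
    rw [ih, List.flatMap_append]
    obtain ⟨c, cs, rfl⟩ : ∃ c cs, remaining = c :: cs := by
      cases remaining with
      | nil => simp at h
      | cons c cs => exact ⟨c, cs, rfl⟩
    rw [← payload_step]
    simp

-- ===== VERDICT (by name: the statement is the Claim_ definition above) =====
theorem problem4a_spec : Claim_equal_problem4a := by
  intro s _
  unfold Spec_problem4a problem4a problem4a_alt
  rw [loop_eq]
  simp [pvPayload]
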